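-- pv_equiv track=rewrite | github.com/goddream66/Mathematical_Modeling_Competition_Agent | src/mathagent/reporting_rewrite.py | _upsert_report_section
-- ===== SOURCE A (Python) =====
-- def _split_top_level_sections(markdown: str) -> list[list[str]]:
--     if not markdown.strip():
--         return []
--     sections: list[list[str]] = []
--     current: list[str] = []
--     for line in markdown.splitlines():
--         if line.startswith("# "):
--             if current:
--                 sections.append(current)
--             current = [line]
--         else:
--             current.append(line)
--     if current:
--         sections.append(current)
--     return sections
--
-- def _upsert_report_section(markdown: str, heading: str, content: str, marker: str) -> str:
--     content = content.strip()
--     if not content: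
--         return markdown.strip()
--
--     sections = _split_top_level_sections(markdown)
--     if not sections:
--         return f"{heading}\n{content}".strip()
--
--     updated_sections: list[str] = []
--     inserted = False
--     for section_lines in sections:
--         section_text = "\n".join(section_lines).rstrip()
--         if section_lines[0].strip() == heading:
--             if marker and marker in section_text:
--                 updated_sections.append(section_text)
--             else:
--                 if section_text.strip() == heading.strip():
--                     updated_sections.append(f"{heading}\n{content}".strip())
--                 else:
--                     updated_sections.append((section_text + "\n\n" + content).strip())
--             inserted = True
--         else:
--             updated_sections.append(section_text)
--     if not inserted:
--         updated_sections.append(f"{heading}\n{content}".strip())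
--     return "\n\n".join(part for part in updated_sections if part).strip()
-- ===== SOURCE B (Python) =====
-- def _upsert_report_section(markdown: str, heading: str, content: str, marker: str) -> str:
--     content = content.strip()
--     if not content:
--         return markdown.strip()
--     if not markdown.strip():
--         return f"{heading}\n{content}".strip()
--
--     lines = markdown.splitlines()
--     # Boundary indices of the top-level sections: every '# ' line, plus 0 for a preamble.
--     starts = [i for i, line in enumerate(lines) if line.startswith("# ")]
--     if not starts or starts[0] != 0:
--         starts = [0] + starts
--     bounds = list(zip(starts, starts[1:] + [len(lines)]))
--
--     new_section = f"{heading}\n{content}".strip()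
--
--     def transform(chunk):
--         text = "\n".join(chunk).rstrip()
--         if chunk[0].strip() != heading:
--             return text
--         if marker and marker in text:
--             return text
--         if text.strip() == heading.strip():
--             return new_section
--         return (text + "\n\n" + content).strip()
--
--     matched = any(lines[a].strip() == heading for a, _ in bounds)
--     parts = [transform(lines[a:b]) for a, b in bounds]
--     if not matched:
--         parts.append(new_section)
--     return "\n\n".join(p for p in parts if p).strip()
-- ===== Notes on version B (the rewrite author's own statement) =====
-- stated objective: alternative
-- what changed: B replaces A's two accumulator loops (grow-current-section split, then a per-section upsert fold) by index arithmetic: it computes the boundary indices of the '# ' lines with one enumerate comprehension, zips consecutive boundaries into (start, end) bounds, and builds the result from list-slice comprehensions plus a separate any() pass for the matched flag.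
import Mathlib
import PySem

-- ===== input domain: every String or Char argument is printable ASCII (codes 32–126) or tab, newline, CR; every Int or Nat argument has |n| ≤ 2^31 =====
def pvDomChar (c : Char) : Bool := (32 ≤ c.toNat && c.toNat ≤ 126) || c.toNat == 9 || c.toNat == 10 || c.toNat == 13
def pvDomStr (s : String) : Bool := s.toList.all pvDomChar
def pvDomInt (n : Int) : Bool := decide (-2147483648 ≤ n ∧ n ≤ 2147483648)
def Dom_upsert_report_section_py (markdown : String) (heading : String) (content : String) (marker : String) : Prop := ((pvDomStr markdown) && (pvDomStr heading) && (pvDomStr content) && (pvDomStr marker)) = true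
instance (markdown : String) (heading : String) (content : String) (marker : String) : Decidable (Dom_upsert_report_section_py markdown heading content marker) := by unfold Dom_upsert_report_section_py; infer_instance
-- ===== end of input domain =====

-- B replaces A's accumulate-sections-then-upsert loops by index arithmetic: it computes the
-- boundary indices of the '# ' lines once, slices the line list between consecutive boundaries,
-- and builds the result by comprehensions over those slices (objective: alternative decomposition).

-- ===== PORT A =====
-- loop body of `for line in markdown.splitlines()` in _split_top_level_sections, hoisted as a named helper
def pvASplitStep (st : List (List String) × List String) (line : String) : List (List String) × List String :=
  if PySem.Str.startswith line "# " then
    ((if st.2.isEmpty then st.1 else st.1 ++ [st.2]), [line])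
  else
    (st.1, st.2 ++ [line])

def upsert_split_top_level_sections (markdown : String) : List (List String) :=
  if PySem.Str.strip markdown == "" then []
  else
    let st := (PySem.Str.splitlines markdown).foldl pvASplitStep ([], [])
    if st.2.isEmpty then st.1 else st.1 ++ [st.2]

-- loop body of `for section_lines in sections`, hoisted as a named helper.
-- section_lines[0]: `headD ""` is exact here because every section produced by the split is nonempty.
-- f"{heading}\n{content}" and x + "\n\n" + y are written as PySem.Str.join of a two-element list (same string).
def pvAStep (heading content marker : String) (st : List String × Bool) (section_lines : List String) : List String × Bool :=
  let section_text := PySem.Str.rstrip (PySem.Str.join "\n" section_lines)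
  if PySem.Str.strip (section_lines.headD "") == heading then
    if !(marker == "") && PySem.Str.isIn marker section_text then
      (st.1 ++ [section_text], true)
    else if PySem.Str.strip section_text == PySem.Str.strip heading then
      (st.1 ++ [PySem.Str.strip (PySem.Str.join "\n" [heading, content])], true)
    else
      (st.1 ++ [PySem.Str.strip (PySem.Str.join "\n\n" [section_text, content])], true)
  else
    (st.1 ++ [section_text], st.2)

def upsert_report_section_py (markdown : String) (heading : String) (content : String) (marker : String) : String :=
  let content := PySem.Str.strip content
  if content == "" then PySem.Str.strip markdown
  else
    let sections := upsert_split_top_level_sections markdown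
    if sections.isEmpty then PySem.Str.strip (PySem.Str.join "\n" [heading, content])
    else
      let st := sections.foldl (pvAStep heading content marker) ([], false)
      let updated := if st.2 then st.1 else st.1 ++ [PySem.Str.strip (PySem.Str.join "\n" [heading, content])]
      PySem.Str.strip (PySem.Str.join "\n\n" (updated.filter (fun p => !(p == ""))))

-- ===== PORT B =====
-- `transform` helper of Source B; chunk[0]: `headD ""` is exact — transform is only applied to nonempty slices
def pvBTransform (heading content marker new_section : String) (chunk : List String) : String :=
  let text := PySem.Str.rstrip (PySem.Str.join "\n" chunk)
  if !(PySem.Str.strip (chunk.headD "") == heading) then text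
  else if !(marker == "") && PySem.Str.isIn marker text then text
  else if PySem.Str.strip text == PySem.Str.strip heading then new_section
  else PySem.Str.strip (PySem.Str.join "\n\n" [text, content])

-- lines[a]: PySem.List.pyGetD is exact here — every boundary index is in range
def upsert_report_section_py_alt (markdown : String) (heading : String) (content : String) (marker : String) : String :=
  let content := PySem.Str.strip content
  if content == "" then PySem.Str.strip markdown
  else if PySem.Str.strip markdown == "" then PySem.Str.strip (PySem.Str.join "\n" [heading, content])
  else
    let lines := PySem.Str.splitlines markdown
    let starts0 := ((PySem.List.enumerate lines 0).filter (fun p => PySem.Str.startswith p.2 "# ")).map Prod.fst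
    let starts := if starts0.isEmpty || !(starts0.headD 0 == 0) then 0 :: starts0 else starts0
    let bounds := starts.zip (starts.tail ++ [(lines.length : Int)])
    let new_section := PySem.Str.strip (PySem.Str.join "\n" [heading, content])
    let matched := bounds.any (fun ab => PySem.Str.strip (PySem.List.pyGetD lines ab.1 "") == heading)
    let parts := bounds.map (fun ab => pvBTransform heading content marker new_section (PySem.List.slice lines (some ab.1) (some ab.2)))
    let parts := if matched then parts else parts ++ [new_section]
    PySem.Str.strip (PySem.Str.join "\n\n" (parts.filter (fun p => !(p == ""))))

-- ===== PRECONDITION & SPEC =====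
def Spec_upsert_report_section_py (markdown : String) (heading : String) (content : String) (marker : String) (out : String) : Prop := out = upsert_report_section_py_alt markdown heading content marker
instance (markdown : String) (heading : String) (content : String) (marker : String) (out : String) : Decidable (Spec_upsert_report_section_py markdown heading content marker out) := by unfold Spec_upsert_report_section_py; infer_instance

-- ===== CLAIM (what is proved, stated in full; the proofs are below) =====
def Claim_equal_upsert_report_section_py : Prop := ∀ (markdown : String) (heading : String) (content : String) (marker : String), Dom_upsert_report_section_py markdown heading content marker → Spec_upsert_report_section_py markdown heading content marker (upsert_report_section_py markdown heading content marker)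

-- ===== LEMMAS AND PROOFS =====

-- abbreviation used throughout the proofs: "continuation line" test
def pvG (l : String) : Bool := !(PySem.Str.startswith l "# ")

-- the top-level sections of `ls` when the (nonempty) section `cur` is open (A's split, relational form)
def pvSecs : List String → List String → List (List String)
  | [], cur => [cur]
  | l :: ls, cur =>
    if PySem.Str.startswith l "# " && !cur.isEmpty then cur :: pvSecs ls [l]
    else pvSecs ls (cur ++ [l])

-- the sections of a line list that starts with a '# ' line (or is heading-free)
def pvChunks : List String → List (List String)
  | [] => []
  | l :: ls => (l :: ls.takeWhile pvG) :: pvChunks (ls.dropWhile pvG)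
termination_by ls => ls.length
decreasing_by
  simp only [List.length_cons]
  have := List.length_dropWhile_le pvG ls
  omega

-- the (Nat) indices of the '# ' lines
def pvIdxN : List String → List Nat
  | [] => []
  | l :: ls => if PySem.Str.startswith l "# " then 0 :: (pvIdxN ls).map (·+1) else (pvIdxN ls).map (·+1)

-- the two facts proved about B's bounds comprehension, per line list:
-- slices between consecutive heading indices = chunks, and the boundary lines = chunk heads
def pvInnerP (r : List String) : Prop :=
  ((pvIdxN r).zip ((pvIdxN r).tail ++ [r.length])).map
      (fun ab => ((r.drop ab.1).take (ab.2 - ab.1))) = pvChunks (r.dropWhile pvG)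
  ∧ ((pvIdxN r).zip ((pvIdxN r).tail ++ [r.length])).map (fun ab => r.getD ab.1 "")
      = (pvChunks (r.dropWhile pvG)).map (fun c => c.headD "")

-- A's split fold computes pvSecs
theorem pvSplit_fold (ls : List String) : ∀ (secs : List (List String)) (cur : List String), cur ≠ [] →
    (if (ls.foldl pvASplitStep (secs, cur)).2.isEmpty then (ls.foldl pvASplitStep (secs, cur)).1
     else (ls.foldl pvASplitStep (secs, cur)).1 ++ [(ls.foldl pvASplitStep (secs, cur)).2])
    = secs ++ pvSecs ls cur := by
  induction ls with
  | nil =>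
    intro secs cur h
    simp [List.foldl, pvSecs, List.isEmpty_iff, h]
  | cons l ls ih =>
    intro secs cur h
    have hcur : cur.isEmpty = false := by simpa [List.isEmpty_iff] using h
    simp only [List.foldl_cons]
    by_cases hsw : PySem.Chars.startswith l.toList ['#', ' '] = true
    · have hstep : pvASplitStep (secs, cur) l = (secs ++ [cur], [l]) := by
        simp [pvASplitStep, hsw, hcur]
      have hsec : pvSecs (l :: ls) cur = cur :: pvSecs ls [l] := by
        simp [pvSecs, hsw, hcur]
      rw [hstep, ih (secs ++ [cur]) [l] (by simp), hsec]
      simp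
    · have hsw' : PySem.Chars.startswith l.toList ['#', ' '] = false := by simpa using hsw
      have hstep : pvASplitStep (secs, cur) l = (secs, cur ++ [l]) := by
        simp [pvASplitStep, hsw']
      have hsec : pvSecs (l :: ls) cur = pvSecs ls (cur ++ [l]) := by
        simp [pvSecs, hsw']
      rw [hstep, hsec]
      exact ih secs (cur ++ [l]) (by simp)

-- pvSecs in closed form: first (open) section, then the chunks of the remaining heading-led text
theorem pvSecs_eq_chunks (ls : List String) : ∀ cur, cur ≠ [] →
    pvSecs ls cur = (cur ++ ls.takeWhile pvG) :: pvChunks (ls.dropWhile pvG) := by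
  induction ls with
  | nil => intro cur h; simp [pvSecs, pvChunks]
  | cons x ls ih =>
    intro cur h
    have hcur : cur.isEmpty = false := by simpa [List.isEmpty_iff] using h
    by_cases hsw : PySem.Chars.startswith x.toList ['#', ' '] = true
    · have hg : pvG x = false := by simp [pvG, hsw]
      have h1 : pvSecs (x :: ls) cur = cur :: pvSecs ls [x] := by
        simp [pvSecs, hsw, hcur]
      rw [h1, ih [x] (by simp)]
      simp [hg, pvChunks]
    · have hsw' : PySem.Chars.startswith x.toList ['#', ' '] = false := by simpa using hsw
      have hg : pvG x = true := by simp [pvG, hsw']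
      have h1 : pvSecs (x :: ls) cur = pvSecs ls (cur ++ [x]) := by
        simp [pvSecs, hsw']
      rw [h1, ih (cur ++ [x]) (by simp)]
      simp [hg, List.append_assoc]

-- pvIdxN is what B's enumerate-filter-map comprehension computes (shifted by the start value)
theorem pvIdx_enum (xs : List String) : ∀ (s : Int),
    ((PySem.List.enumerate xs s).filter (fun p => PySem.Str.startswith p.2 "# ")).map Prod.fst
      = (pvIdxN xs).map (fun k : Nat => s + (k : Int)) := by
  induction xs with
  | nil => intro s; simp [PySem.List.enumerate_nil, pvIdxN]
  | cons x xs ih =>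
    intro s
    rw [PySem.List.enumerate_cons]
    by_cases hsw : PySem.Chars.startswith x.toList ['#', ' '] = true
    · rw [List.filter_cons_of_pos (by simpa using hsw)]
      have hidx : pvIdxN (x :: xs) = 0 :: (pvIdxN xs).map (·+1) := by simp [pvIdxN, hsw]
      rw [hidx, List.map_cons, List.map_cons, ih (s + 1), List.map_map]
      refine congrArg₂ _ (by push_cast; ring) ?_
      refine List.map_congr_left (fun k _ => ?_)
      simp only [Function.comp_apply]
      push_cast
      ring
    · rw [List.filter_cons_of_neg (by simpa using hsw)]
      have hsw' : PySem.Chars.startswith x.toList ['#', ' '] = false := by simpa using hsw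
      have hidx : pvIdxN (x :: xs) = (pvIdxN xs).map (·+1) := by simp [pvIdxN, hsw']
      rw [hidx, ih (s + 1), List.map_map]
      refine List.map_congr_left (fun k _ => ?_)
      simp only [Function.comp_apply]
      push_cast
      ring

-- no '# ' line ⇒ takeWhile keeps everything
theorem pvIdxN_nil_takeWhile (r : List String) (h : pvIdxN r = []) :
    r.takeWhile pvG = r ∧ r.dropWhile pvG = [] := by
  induction r with
  | nil => simp
  | cons x r ih =>
    by_cases hsw : PySem.Chars.startswith x.toList ['#', ' '] = true
    · exfalso
      have : pvIdxN (x :: r) = 0 :: (pvIdxN r).map (·+1) := by simp [pvIdxN, hsw]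
      rw [this] at h
      exact List.cons_ne_nil _ _ h
    · have hsw' : PySem.Chars.startswith x.toList ['#', ' '] = false := by simpa using hsw
      have hg : pvG x = true := by simp [pvG, hsw']
      have hidx : pvIdxN (x :: r) = (pvIdxN r).map (·+1) := by simp [pvIdxN, hsw']
      rw [hidx] at h
      have hr : pvIdxN r = [] := by simpa using h
      have := ih hr
      simp [hg, this.1, this.2]

-- take up to the first heading index = takeWhile on the continuation test
theorem pvTake_idx (r : List String) : r.take ((pvIdxN r).headD r.length) = r.takeWhile pvG := by
  induction r with
  | nil => simp
  | cons x r ih =>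
    by_cases hsw : PySem.Chars.startswith x.toList ['#', ' '] = true
    · have hg : pvG x = false := by simp [pvG, hsw]
      have hidx : pvIdxN (x :: r) = 0 :: (pvIdxN r).map (·+1) := by simp [pvIdxN, hsw]
      simp [hidx, hg]
    · have hsw' : PySem.Chars.startswith x.toList ['#', ' '] = false := by simpa using hsw
      have hg : pvG x = true := by simp [pvG, hsw']
      have hidx : pvIdxN (x :: r) = (pvIdxN r).map (·+1) := by simp [pvIdxN, hsw']
      rw [hidx]
      have hh : ((pvIdxN r).map (·+1)).headD (x :: r).length = (pvIdxN r).headD r.length + 1 := by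
        cases hr : pvIdxN r <;> simp [List.length_cons]
      rw [hh, List.take_succ_cons, List.takeWhile_cons_of_pos hg, ih]

-- map over shifted bounds of (x :: r) = map over the original bounds of r  (slices)
theorem pvSlice_shift (x : String) (r : List String) (A B : List Nat) (n : Nat) :
    ((A.map (·+1)).zip ((B.map (·+1)) ++ [n + 1])).map
        (fun ab => (((x :: r).drop ab.1).take (ab.2 - ab.1)))
      = (A.zip (B ++ [n])).map (fun ab => ((r.drop ab.1).take (ab.2 - ab.1))) := by
  have h1 : (B.map (·+1)) ++ [n + 1] = (B ++ [n]).map (·+1) := by simp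
  rw [h1, List.zip_map]
  simp only [List.map_map]
  refine List.map_congr_left (fun ab _ => ?_)
  obtain ⟨a, b⟩ := ab
  simp only [Function.comp_apply, Prod.map]
  have : (b + 1) - (a + 1) = b - a := by omega
  simp [this]

-- same shift for the boundary-line lookups
theorem pvGet_shift (x : String) (r : List String) (A B : List Nat) (n : Nat) :
    ((A.map (·+1)).zip ((B.map (·+1)) ++ [n + 1])).map (fun ab => (x :: r).getD ab.1 "")
      = (A.zip (B ++ [n])).map (fun ab => r.getD ab.1 "") := by
  have h1 : (B.map (·+1)) ++ [n + 1] = (B ++ [n]).map (·+1) := by simp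
  rw [h1, List.zip_map]
  simp only [List.map_map]
  refine List.map_congr_left (fun ab _ => ?_)
  obtain ⟨a, b⟩ := ab
  simp [Prod.map]

-- bounds of a list with the first boundary forced to 0: slices = first chunk :: chunks of the tail
theorem pvMainAux (l : String) (ls : List String) (ih : pvInnerP ls) :
    ((0 :: (pvIdxN ls).map (·+1)).zip (((pvIdxN ls).map (·+1)) ++ [(l :: ls).length])).map
        (fun ab => (((l :: ls).drop ab.1).take (ab.2 - ab.1)))
      = (l :: ls.takeWhile pvG) :: pvChunks (ls.dropWhile pvG)
    ∧ ((0 :: (pvIdxN ls).map (·+1)).zip (((pvIdxN ls).map (·+1)) ++ [(l :: ls).length])).map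
        (fun ab => (l :: ls).getD ab.1 "")
      = ((l :: ls.takeWhile pvG) :: pvChunks (ls.dropWhile pvG)).map (fun c => c.headD "") := by
  cases hI : pvIdxN ls with
  | nil =>
    have hud := pvIdxN_nil_takeWhile ls hI
    constructor
    · simp [hud.1, hud.2, pvChunks, List.length_cons, List.take_of_length_le]
    · simp [hud.2, pvChunks]
  | cons i I' =>
    have ht : ls.take i = ls.takeWhile pvG := by
      have := pvTake_idx ls
      rw [hI] at this
      simpa using this
    have hIH1 := ih.1
    have hIH2 := ih.2
    rw [hI] at hIH1 hIH2
    simp only [List.tail_cons] at hIH1 hIH2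
    have hshift1 := pvSlice_shift l ls (i :: I') I' ls.length
    have hshift2 := pvGet_shift l ls (i :: I') I' ls.length
    simp only [List.map_cons] at hshift1 hshift2
    constructor
    · simp only [List.map_cons, List.length_cons, List.cons_append, List.zip_cons_cons]
      rw [hshift1, hIH1]
      refine congrArg₂ List.cons ?_ rfl
      show ((l :: ls).drop 0).take (i + 1 - 0) = l :: ls.takeWhile pvG
      simp [List.take_succ_cons, ht]
    · simp only [List.map_cons, List.length_cons, List.cons_append, List.zip_cons_cons]
      rw [hshift2, hIH2]
      rfl

theorem pvInner (r : List String) : pvInnerP r := by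
  induction r with
  | nil => constructor <;> simp [pvIdxN, pvChunks]
  | cons x r ih =>
    by_cases hsw : PySem.Chars.startswith x.toList ['#', ' '] = true
    · have hg : pvG x = false := by simp [pvG, hsw]
      have hdw : (x :: r).dropWhile pvG = x :: r := by simp [hg]
      have hidx : pvIdxN (x :: r) = 0 :: (pvIdxN r).map (·+1) := by simp [pvIdxN, hsw]
      have hch : pvChunks (x :: r) = (x :: r.takeWhile pvG) :: pvChunks (r.dropWhile pvG) := by
        simp [pvChunks]
      have hm := pvMainAux x r ih
      obtain ⟨hm1, hm2⟩ := hm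
      unfold pvInnerP
      constructor
      · rw [hidx]
        simp only [List.tail_cons]
        rw [hdw, hch]
        exact hm1
      · rw [hidx]
        simp only [List.tail_cons]
        rw [hdw, hch]
        exact hm2
    · have hsw' : PySem.Chars.startswith x.toList ['#', ' '] = false := by simpa using hsw
      have hg : pvG x = true := by simp [pvG, hsw']
      have hdw : (x :: r).dropWhile pvG = r.dropWhile pvG := by simp [hg]
      have hidx : pvIdxN (x :: r) = (pvIdxN r).map (·+1) := by simp [pvIdxN, hsw']
      have htl : ((pvIdxN r).map (·+1)).tail = ((pvIdxN r).tail).map (·+1) := by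
        cases pvIdxN r <;> simp
      obtain ⟨ih1, ih2⟩ := ih
      unfold pvInnerP
      constructor
      · rw [hidx, htl, hdw, show (x :: r).length = r.length + 1 from by simp]
        rw [pvSlice_shift x r (pvIdxN r) ((pvIdxN r).tail) r.length]
        exact ih1
      · rw [hidx, htl, hdw, show (x :: r).length = r.length + 1 from by simp]
        rw [pvGet_shift x r (pvIdxN r) ((pvIdxN r).tail) r.length]
        exact ih2

-- A's per-section loop body, expressed through B's transform and the head test
theorem pvStep_eq (heading content marker : String)
    (parts : List String) (matched : Bool) (sec : List String) :
    pvAStep heading content marker (parts, matched) sec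
      = (parts ++ [pvBTransform heading content marker
          (PySem.Str.strip (PySem.Str.join "\n" [heading, content])) sec],
         matched || (PySem.Str.strip (sec.headD "") == heading)) := by
  simp only [pvAStep, pvBTransform]
  split_ifs <;> simp_all

-- fold of A's loop body = map B's transform + any of the head test
theorem pvFold_eq (heading content marker : String)
    (secs : List (List String)) : ∀ (parts : List String) (matched : Bool),
    secs.foldl (pvAStep heading content marker) (parts, matched)
      = (parts ++ secs.map (pvBTransform heading content marker
           (PySem.Str.strip (PySem.Str.join "\n" [heading, content]))),
         matched || secs.any (fun sec => PySem.Str.strip (sec.headD "") == heading)) := by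
  induction secs with
  | nil => intro parts matched; simp
  | cons sec secs ih =>
    intro parts matched
    rw [List.foldl_cons, pvStep_eq heading content marker, ih]
    simp [Bool.or_assoc]

-- empty splitlines result forces empty input
theorem pvGo_nil (isB : Char → Bool) (s cur : List Char) (acc : List (List Char)) :
    PySem.Chars.splitlines.go isB s cur acc = [] → s = [] ∧ cur = [] ∧ acc = [] := by
  induction s, cur, acc using PySem.Chars.splitlines.go.induct isB with
  | _ => simp_all [PySem.Chars.splitlines.go]

theorem pvSplitlines_ne (s : String) (h : ¬ (PySem.Str.strip s == "") = true) :
    PySem.Str.splitlines s ≠ [] := by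
  intro hc
  have h2 : PySem.Chars.splitlines s.toList = [] := by
    have := congrArg (List.map String.toList) hc
    rw [PySem.Str.splitlines_map_toList] at this
    simpa using this
  have h3 := (pvGo_nil _ s.toList [] [] h2).1
  apply h
  have : PySem.Str.strip s = String.ofList (PySem.Chars.strip s.toList) := rfl
  rw [this, h3]
  rfl

set_option maxHeartbeats 1000000 in
theorem upsert_report_section_py_spec_aux (markdown heading content marker : String) :
    upsert_report_section_py markdown heading content marker
      = upsert_report_section_py_alt markdown heading content marker := by
  simp only [upsert_report_section_py, upsert_report_section_py_alt]
  by_cases hc : (PySem.Str.strip content == "") = true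
  · rw [if_pos hc, if_pos hc]
  · rw [if_neg hc, if_neg hc]
    by_cases hm : (PySem.Str.strip markdown == "") = true
    · have hsec : upsert_split_top_level_sections markdown = [] := by
        simp only [upsert_split_top_level_sections]
        rw [if_pos hm]
      rw [if_pos hm, hsec]
      rfl
    · rw [if_neg hm]
      cases hL : PySem.Str.splitlines markdown with
      | nil => exact absurd hL (pvSplitlines_ne markdown hm)
      | cons l ls =>
        -- A's section list is pvSecs ls [l] = first chunk :: pvChunks of the tail
        have hA0 : pvASplitStep ([], []) l = ([], [l]) := by
          simp [pvASplitStep]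
        have hsec : upsert_split_top_level_sections markdown = pvSecs ls [l] := by
          simp only [upsert_split_top_level_sections]
          rw [if_neg hm, hL, List.foldl_cons, hA0]
          simpa using pvSplit_fold ls [] [l] (by simp)
        have hchunks : pvSecs ls [l]
            = (l :: ls.takeWhile pvG) :: pvChunks (ls.dropWhile pvG) := by
          simpa using pvSecs_eq_chunks ls [l] (by simp)
        rw [hsec, hchunks]
        rw [if_neg (by simp)]
        rw [pvFold_eq heading (PySem.Str.strip content) marker]
        simp only [List.nil_append, Bool.false_or]
        -- B's side: rewrite the index comprehension, the bounds, and the two comprehensions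
        have hS0 : ((PySem.List.enumerate (l :: ls) 0).filter
              (fun p => PySem.Str.startswith p.2 "# ")).map Prod.fst
            = (pvIdxN (l :: ls)).map (fun k : Nat => (k : Int)) := by
          have := pvIdx_enum (l :: ls) 0
          simpa using this
        rw [hS0]
        have hNS : (if ((pvIdxN (l :: ls)).map (fun k : Nat => (k : Int))).isEmpty
                || !(((pvIdxN (l :: ls)).map (fun k : Nat => (k : Int))).headD 0 == 0) then
              0 :: (pvIdxN (l :: ls)).map (fun k : Nat => (k : Int))
            else (pvIdxN (l :: ls)).map (fun k : Nat => (k : Int)))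
            = (0 :: (pvIdxN ls).map (·+1)).map (fun k : Nat => (k : Int)) := by
          by_cases hsw : PySem.Chars.startswith l.toList ['#', ' '] = true
          · have hidx : pvIdxN (l :: ls) = 0 :: (pvIdxN ls).map (·+1) := by
              simp [pvIdxN, hsw]
            rw [hidx]
            rw [if_neg (by simp)]
          · have hsw' : PySem.Chars.startswith l.toList ['#', ' '] = false := by simpa using hsw
            have hidx : pvIdxN (l :: ls) = (pvIdxN ls).map (·+1) := by simp [pvIdxN, hsw']
            rw [hidx]
            cases hI : pvIdxN ls with
            | nil => simp
            | cons i I' =>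
              rw [if_pos (by simp; omega)]
              simp
        rw [hNS]
        have hzip : (((0 :: (pvIdxN ls).map (·+1)).map (fun k : Nat => (k : Int))).zip
              ((((0 :: (pvIdxN ls).map (·+1)).map (fun k : Nat => (k : Int))).tail)
                ++ [((l :: ls).length : Int)]))
            = ((0 :: (pvIdxN ls).map (·+1)).zip
                (((pvIdxN ls).map (·+1)) ++ [(l :: ls).length])).map
                (Prod.map (fun k : Nat => (k : Int)) (fun k : Nat => (k : Int))) := by
          rw [show ((((0 :: (pvIdxN ls).map (·+1)).map (fun k : Nat => (k : Int))).tail)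
                ++ [((l :: ls).length : Int)])
              = ((((pvIdxN ls).map (·+1)) ++ [(l :: ls).length]).map (fun k : Nat => (k : Int)))
              from by simp]
          rw [List.zip_map]
        rw [hzip]
        obtain ⟨hNB1, hNB2⟩ := pvMainAux l ls (pvInner ls)
        have hmatched : ((((0 :: (pvIdxN ls).map (·+1)).zip
                (((pvIdxN ls).map (·+1)) ++ [(l :: ls).length])).map
                (Prod.map (fun k : Nat => (k : Int)) (fun k : Nat => (k : Int)))).any
              (fun ab => PySem.Str.strip (PySem.List.pyGetD (l :: ls) ab.1 "") == heading))
            = ((l :: ls.takeWhile pvG) :: pvChunks (ls.dropWhile pvG)).any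
                (fun sec => PySem.Str.strip (sec.headD "") == heading) := by
          have hfun : ((fun ab : Int × Int => PySem.Str.strip (PySem.List.pyGetD (l :: ls) ab.1 "") == heading)
                ∘ (Prod.map (fun k : Nat => (k : Int)) (fun k : Nat => (k : Int))))
              = (fun ab : Nat × Nat => PySem.Str.strip ((l :: ls).getD ab.1 "") == heading) := by
            funext ab
            show (PySem.Str.strip (PySem.List.pyGetD (l :: ls) ((ab.1 : Int)) "") == heading) = _
            rw [PySem.List.pyGetD_natCast]
          rw [List.any_map, hfun]
          have hR : ((((l :: ls.takeWhile pvG) :: pvChunks (ls.dropWhile pvG)).map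
                  (fun c => c.headD "")).any (fun v => PySem.Str.strip v == heading))
              = (((l :: ls.takeWhile pvG) :: pvChunks (ls.dropWhile pvG)).any
                  (fun sec => PySem.Str.strip (sec.headD "") == heading)) := by
            simp only [List.any_map, Function.comp_def]
          have hL2 : (((((0 :: (pvIdxN ls).map (·+1)).zip
                (((pvIdxN ls).map (·+1)) ++ [(l :: ls).length]))).map
                  (fun ab => (l :: ls).getD ab.1 "")).any (fun v => PySem.Str.strip v == heading))
              = ((((0 :: (pvIdxN ls).map (·+1)).zip
                (((pvIdxN ls).map (·+1)) ++ [(l :: ls).length]))).any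
                  (fun ab : Nat × Nat => PySem.Str.strip ((l :: ls).getD ab.1 "") == heading)) := by
            simp only [List.any_map, Function.comp_def]
          rw [← hL2, hNB2, hR]
        rw [hmatched]
        have hparts : ((((0 :: (pvIdxN ls).map (·+1)).zip
                (((pvIdxN ls).map (·+1)) ++ [(l :: ls).length])).map
                (Prod.map (fun k : Nat => (k : Int)) (fun k : Nat => (k : Int)))).map
              (fun ab => pvBTransform heading (PySem.Str.strip content) marker
                (PySem.Str.strip (PySem.Str.join "\n" [heading, PySem.Str.strip content]))
                (PySem.List.slice (l :: ls) (some ab.1) (some ab.2))))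
            = ((l :: ls.takeWhile pvG) :: pvChunks (ls.dropWhile pvG)).map
                (pvBTransform heading (PySem.Str.strip content) marker
                  (PySem.Str.strip (PySem.Str.join "\n" [heading, PySem.Str.strip content]))) := by
          rw [List.map_map, ← hNB1, List.map_map]
          simp only [Function.comp_def, Prod.map_fst, Prod.map_snd, PySem.List.slice_natCast]
        rw [hparts]

-- ===== VERDICT (by name: the statement is the Claim_ definition above) =====
theorem upsert_report_section_py_spec : Claim_equal_upsert_report_section_py := by
  intro markdown heading content marker _
  unfold Spec_upsert_report_section_py
  exact upsert_report_section_py_spec_aux markdown heading content marker
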